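-- pv_equiv track=rewrite | github.com/liurenchang62/cross_platform_arbitrage_system_python | unclassified_logger.py | _trim_non_alphanumeric_edges
-- ===== SOURCE A (Python) =====
-- def _trim_non_alphanumeric_edges(word: str) -> str:
--     """与 Rust `trim_matches(|c: char| !c.is_alphanumeric())` 一致：去掉两端非字母数字字符。"""
--     if not word:
--         return word
--     start, end = 0, len(word)
--     while start < end and not word[start].isalnum():
--         start += 1
--     while start < end and not word[end - 1].isalnum():
--         end -= 1
--     return word[start:end]
-- ===== SOURCE B (Python) =====
-- def _trim_non_alphanumeric_edges(word: str) -> str: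
--     """Trim non-alphanumeric characters from both ends, as two prefix-drops
--     (one fold over the characters) separated by reversals."""
--     def drop_prefix(chars):
--         out = []
--         keep = False
--         for c in chars:
--             if keep or c.isalnum():
--                 keep = True
--                 out.append(c)
--         return out
--     return ''.join(reversed(drop_prefix(reversed(drop_prefix(word)))))
-- ===== Notes on version B (the rewrite author's own statement) =====
-- stated objective: alternative
-- what changed: Replaces the two inward index-scanning while loops and a slice by a fold-based prefix-drop applied twice with a reversal in between (drop leading junk, reverse, drop leading junk again, reverse back), building the result list directly instead of computing start/end indices.
import Mathlib
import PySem

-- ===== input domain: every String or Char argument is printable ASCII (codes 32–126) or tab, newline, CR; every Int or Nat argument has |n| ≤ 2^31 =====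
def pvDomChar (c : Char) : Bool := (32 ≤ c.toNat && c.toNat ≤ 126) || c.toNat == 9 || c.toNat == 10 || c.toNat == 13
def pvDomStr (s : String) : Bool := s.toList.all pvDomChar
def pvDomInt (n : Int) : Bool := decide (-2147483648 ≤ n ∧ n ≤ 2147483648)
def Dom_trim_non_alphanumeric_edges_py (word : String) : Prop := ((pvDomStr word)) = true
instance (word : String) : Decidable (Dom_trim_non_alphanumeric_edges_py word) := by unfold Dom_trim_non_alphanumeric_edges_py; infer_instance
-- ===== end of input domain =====

-- B replaces A's two inward edge-scanning index loops + slice by a fold-based prefix-drop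
-- applied twice around a reversal (objective: alternative decomposition, same O(n) cost).

-- ===== PORT A =====
-- first while loop: advance start while start < end and word[start] is not alphanumeric
-- (indices are always in range here, so getD's default is never used)
def pvTrimStart (cs : List Char) (endi start : Nat) : Nat :=
  if h : start < endi ∧ PySem.Chars.isalnum (cs.getD start ' ') = false then
    pvTrimStart cs endi (start + 1)
  else start
termination_by endi - start
decreasing_by omega

-- second while loop: retreat end while start < end and word[end-1] is not alphanumeric
def pvTrimEnd (cs : List Char) (start endi : Nat) : Nat :=
  if h : start < endi ∧ PySem.Chars.isalnum (cs.getD (endi - 1) ' ') = false then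
    pvTrimEnd cs start (endi - 1)
  else endi
termination_by endi
decreasing_by omega

def trim_non_alphanumeric_edges_py (word : String) : String :=
  if word = "" then word
  else
    let cs := word.toList
    let start := pvTrimStart cs cs.length 0
    let endi := pvTrimEnd cs start cs.length
    -- word[start:end] with 0 ≤ start ≤ end ≤ len word: exactly drop/take
    String.ofList ((cs.drop start).take (endi - start))

-- ===== PORT B =====
-- Source B's drop_prefix: one fold carrying (keep, collected-so-far); collected is built reversed
-- (Python appends; here we cons and reverse at the end — same traversal, same values)
def pvDropPrefix (cs : List Char) : List Char :=
  ((cs.foldl (fun (st : Bool × List Char) c =>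
      if st.1 || PySem.Chars.isalnum c then (true, c :: st.2) else st)
    (false, ([] : List Char))).2).reverse

def trim_non_alphanumeric_edges_py_alt (word : String) : String :=
  String.ofList ((pvDropPrefix ((pvDropPrefix word.toList).reverse)).reverse)

-- ===== PRECONDITION & SPEC =====
def Spec_trim_non_alphanumeric_edges_py (word : String) (out : String) : Prop := out = trim_non_alphanumeric_edges_py_alt word
instance (word : String) (out : String) : Decidable (Spec_trim_non_alphanumeric_edges_py word out) := by unfold Spec_trim_non_alphanumeric_edges_py; infer_instance

-- ===== CLAIM (what is proved, stated in full; the proofs are below) =====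
def Claim_equal_trim_non_alphanumeric_edges_py : Prop := ∀ (word : String), Dom_trim_non_alphanumeric_edges_py word → Spec_trim_non_alphanumeric_edges_py word (trim_non_alphanumeric_edges_py word)

-- ===== LEMMAS AND PROOFS =====

def pvQ (c : Char) : Bool := !(PySem.Chars.isalnum c)

theorem pvFold_true (cs : List Char) (acc : List Char) :
    cs.foldl (fun (st : Bool × List Char) c =>
      if st.1 || PySem.Chars.isalnum c then (true, c :: st.2) else st) (true, acc)
      = (true, cs.reverse ++ acc) := by
  induction cs generalizing acc with
  | nil => simp
  | cons c cs ih =>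
    rw [List.foldl_cons]
    exact (ih (c :: acc)).trans (by simp)

theorem pvFold_false (cs : List Char) (acc : List Char) :
    (cs.foldl (fun (st : Bool × List Char) c =>
      if st.1 || PySem.Chars.isalnum c then (true, c :: st.2) else st) (false, acc)).2
      = (cs.dropWhile pvQ).reverse ++ acc := by
  induction cs generalizing acc with
  | nil => simp
  | cons c cs ih =>
    rw [List.foldl_cons]
    by_cases h : PySem.Chars.isalnum c
    · have hf : (if ((false, acc).1 || PySem.Chars.isalnum c) = true
          then (true, c :: (false, acc).2) else (false, acc)) = (true, c :: acc) := by simp [h]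
      rw [hf, pvFold_true]
      simp [pvQ, h]
    · have hf : (if ((false, acc).1 || PySem.Chars.isalnum c) = true
          then (true, c :: (false, acc).2) else (false, acc)) = ((false, acc) : Bool × List Char) := by simp [h]
      rw [hf, ih]
      simp [pvQ, h]

theorem pvDropPrefix_eq (cs : List Char) : pvDropPrefix cs = cs.dropWhile pvQ := by
  unfold pvDropPrefix
  rw [pvFold_false]
  simp

theorem pvTrimStart_eq (cs : List Char) (s : Nat) (hs : s ≤ cs.length) :
    pvTrimStart cs cs.length s ≤ cs.length ∧
      cs.drop (pvTrimStart cs cs.length s) = (cs.drop s).dropWhile pvQ := by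
  unfold pvTrimStart
  split
  · next h =>
    obtain ⟨h1, h2⟩ := h
    have := pvTrimStart_eq cs (s + 1) (by omega)
    refine ⟨this.1, ?_⟩
    rw [this.2]
    rw [List.drop_eq_getElem_cons h1]
    have hg : cs.getD s ' ' = cs[s] := List.getD_eq_getElem cs ' ' h1
    simp [List.dropWhile, pvQ, hg ▸ h2]
  · next h =>
    refine ⟨hs, ?_⟩
    rcases Nat.lt_or_ge s cs.length with hl | hl
    · have hg : cs.getD s ' ' = cs[s] := List.getD_eq_getElem cs ' ' hl
      have ha : PySem.Chars.isalnum (cs.getD s ' ') = true := by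
        by_contra hc
        exact h ⟨hl, by simpa using hc⟩
      rw [List.drop_eq_getElem_cons hl]
      simp [List.dropWhile, pvQ, hg ▸ ha]
    · simp [List.drop_eq_nil_of_le hl]
termination_by cs.length - s
decreasing_by omega

-- trailing-junk strip, the form B computes
def pvRstrip (xs : List Char) : List Char := (xs.reverse.dropWhile pvQ).reverse

theorem pvTakePred (cs : List Char) (e : Nat) (h0 : 0 < e) (hlt : e - 1 < cs.length) :
    cs.take e = cs.take (e - 1) ++ [cs[e - 1]] := by
  have he1 : cs.take e = cs.take ((e - 1) + 1) := by
    rw [Nat.sub_add_cancel (by omega)]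
  rw [he1, List.take_add_one]
  simp [List.getElem?_eq_getElem hlt]

theorem pvTrimEnd_eq (cs : List Char) (s e : Nat) (hse : s ≤ e) (he : e ≤ cs.length) :
    (cs.take (pvTrimEnd cs s e)).drop s = pvRstrip ((cs.take e).drop s) := by
  unfold pvTrimEnd
  split
  · next h =>
    obtain ⟨h1, h2⟩ := h
    have hlt : e - 1 < cs.length := by omega
    have hrec := pvTrimEnd_eq cs s (e - 1) (by omega) (by omega)
    rw [hrec]
    have hstep : (cs.take e).drop s = ((cs.take (e - 1)).drop s) ++ [cs[e - 1]] := by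
      rw [pvTakePred cs e (by omega) hlt,
        List.drop_append_of_le_length (by simp; omega)]
    rw [hstep]
    have hg : cs.getD (e - 1) ' ' = cs[e - 1] := List.getD_eq_getElem cs ' ' hlt
    simp [pvRstrip, pvQ, hg ▸ h2]
  · next h =>
    rcases Nat.eq_or_lt_of_le hse with heq | hlt
    · subst heq
      have hnil : (cs.take s).drop s = ([] : List Char) := by
        apply List.drop_eq_nil_of_le; simp
      simp [hnil, pvRstrip]
    · have hlt1 : e - 1 < cs.length := by omega
      have hg : cs.getD (e - 1) ' ' = cs[e - 1] := List.getD_eq_getElem cs ' ' hlt1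
      have ha : PySem.Chars.isalnum (cs.getD (e - 1) ' ') = true := by
        by_contra hc
        exact h ⟨hlt, by simpa using hc⟩
      have hstep : (cs.take e).drop s = ((cs.take (e - 1)).drop s) ++ [cs[e - 1]] := by
        rw [pvTakePred cs e (by omega) hlt1,
          List.drop_append_of_le_length (by simp; omega)]
      rw [hstep]
      simp [pvRstrip, pvQ, hg ▸ ha]
termination_by e

theorem trim_main (word : String) :
    trim_non_alphanumeric_edges_py word = trim_non_alphanumeric_edges_py_alt word := by
  unfold trim_non_alphanumeric_edges_py trim_non_alphanumeric_edges_py_alt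
  by_cases hw : word = ""
  · subst hw; rfl
  · simp only [hw, if_false]
    set cs := word.toList with hcs
    obtain ⟨hsle, hsdrop⟩ := pvTrimStart_eq cs 0 (Nat.zero_le _)
    set s := pvTrimStart cs cs.length 0 with hsdef
    have hdrop0 : cs.drop s = cs.dropWhile pvQ := by simpa using hsdrop
    have hend := pvTrimEnd_eq cs s cs.length hsle (le_refl _)
    set e := pvTrimEnd cs s cs.length with hedef
    have htd : (cs.drop s).take (e - s) = (cs.take e).drop s := by
      rw [List.drop_take]
    rw [htd, hend]
    simp only [List.take_length] at *
    rw [hdrop0] at hend ⊢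
    congr 1
    rw [pvDropPrefix_eq, pvDropPrefix_eq]
    simp [pvRstrip]

-- ===== VERDICT (by name: the statement is the Claim_ definition above) =====
theorem trim_non_alphanumeric_edges_py_spec : Claim_equal_trim_non_alphanumeric_edges_py := by
  intro word _
  unfold Spec_trim_non_alphanumeric_edges_py
  exact trim_main word
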